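-- pv_equiv track=rewrite | github.com/VitalikSay/old-ReelsMaster | main.py | check_special_symbols
-- ===== SOURCE A (Python) =====
-- def check_special_symbols(reel, special_symbol, step_between_sp_symbols, number_of_sp_symbols):
--     error_in_step = False
--     error_in_count = False
--     special_symbol_positions = []
--     for i in range(len(reel)):
--         if reel[i] == special_symbol:
--             special_symbol_positions.append(i)
--     steps_between_sp_symbols = []
--     for i in range(1, len(special_symbol_positions)):
--         steps_between_sp_symbols.append(special_symbol_positions[i] - special_symbol_positions[i-1])
--     if (number_of_sp_symbols != 0):
--         steps_between_sp_symbols.append(special_symbol_positions[0] + len(reel) - special_symbol_positions[-1] - 1)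
--     for _ in steps_between_sp_symbols:
--         if _ < step_between_sp_symbols:
--             error_in_step = True
--     if len(special_symbol_positions) != number_of_sp_symbols:
--         error_in_count = True
--     if error_in_step or error_in_count:
--         return False
--     else:
--         return True
-- ===== SOURCE B (Python) =====
-- def check_special_symbols(reel, special_symbol, step_between_sp_symbols, number_of_sp_symbols):
--     count = 0
--     first = None
--     prev = None
--     bad_step = False
--     for i, sym in enumerate(reel):
--         if sym == special_symbol:
--             count += 1
--             if prev is None:
--                 first = i
--             elif i - prev < step_between_sp_symbols:
--                 bad_step = True
--             prev = i
--     if number_of_sp_symbols != 0: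
--         if first + len(reel) - prev - 1 < step_between_sp_symbols:
--             bad_step = True
--     return not bad_step and count == number_of_sp_symbols
-- ===== Notes on version B (the rewrite author's own statement) =====
-- stated objective: simpler
-- what changed: Replaces A's three passes with materialized position and gap lists by a single fused pass over the reel maintaining count/first/prev/bad-step in O(1) extra space.
-- outside the precondition, e.g. on check_special_symbols(['a', 'b'], 'X', 1, 2): A raises IndexError, B raises TypeError
import Mathlib
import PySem

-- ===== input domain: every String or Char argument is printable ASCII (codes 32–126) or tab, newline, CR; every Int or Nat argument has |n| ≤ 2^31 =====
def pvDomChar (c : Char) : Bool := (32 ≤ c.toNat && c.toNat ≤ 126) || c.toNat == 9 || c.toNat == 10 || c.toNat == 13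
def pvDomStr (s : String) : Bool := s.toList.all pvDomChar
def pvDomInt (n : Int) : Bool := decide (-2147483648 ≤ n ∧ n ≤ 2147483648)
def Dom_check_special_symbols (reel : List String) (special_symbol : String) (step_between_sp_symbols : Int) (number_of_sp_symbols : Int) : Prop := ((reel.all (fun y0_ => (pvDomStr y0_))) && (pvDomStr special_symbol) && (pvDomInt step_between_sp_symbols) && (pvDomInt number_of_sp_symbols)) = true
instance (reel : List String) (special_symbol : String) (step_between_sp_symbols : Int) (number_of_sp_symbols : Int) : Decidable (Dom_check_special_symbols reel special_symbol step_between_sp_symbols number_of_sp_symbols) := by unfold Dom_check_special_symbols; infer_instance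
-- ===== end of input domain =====

-- B is a single fused pass maintaining count/first/prev/bad-step, replacing A's
-- materialized position and gap lists (objective: simpler, one pass, O(1) extra space).
-- Both programs raise where the symbol is absent yet a nonzero count is required; Pre_ excludes that.

-- ===== PORT A =====
def check_special_symbols (reel : List String) (special_symbol : String) (step_between_sp_symbols : Int) (number_of_sp_symbols : Int) : Bool :=
  let special_symbol_positions : List Int :=
    (PySem.List.pyRange 0 reel.length 1).foldl
      (fun acc i => if PySem.List.pyGetD reel i "" = special_symbol then acc ++ [i] else acc) []
  let steps0 : List Int :=
    (PySem.List.pyRange 1 special_symbol_positions.length 1).foldl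
      (fun acc i => acc ++ [PySem.List.pyGetD special_symbol_positions i 0
                            - PySem.List.pyGetD special_symbol_positions (i - 1) 0]) []
  let steps_between_sp_symbols : List Int :=
    if number_of_sp_symbols ≠ 0 then
      steps0 ++ [PySem.List.pyGetD special_symbol_positions 0 0 + (reel.length : Int)
                 - PySem.List.pyGetD special_symbol_positions (-1) 0 - 1]
    else steps0
  let error_in_step : Bool :=
    steps_between_sp_symbols.foldl (fun e x => if x < step_between_sp_symbols then true else e) false
  let error_in_count : Bool := decide ((special_symbol_positions.length : Int) ≠ number_of_sp_symbols)
  if error_in_step || error_in_count then false else true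

-- ===== PORT B =====
-- fold state: (count, first, prev, bad_step)
def pvStepB (special_symbol : String) (step_between_sp_symbols : Int)
    (st : Int × Option Int × Option Int × Bool) (p : Int × String) :
    Int × Option Int × Option Int × Bool :=
  let (count, first, prev, bad) := st
  if p.2 = special_symbol then
    match prev with
    | none => (count + 1, some p.1, some p.1, bad)
    | some pv => (count + 1, first, some p.1, if p.1 - pv < step_between_sp_symbols then true else bad)
  else st

def check_special_symbols_alt (reel : List String) (special_symbol : String) (step_between_sp_symbols : Int) (number_of_sp_symbols : Int) : Bool :=
  let st := (PySem.List.enumerate reel).foldl (pvStepB special_symbol step_between_sp_symbols)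
              (0, none, none, false)
  let (count, first, prev, bad) := st
  let bad :=
    if number_of_sp_symbols ≠ 0 then
      if first.getD 0 + (reel.length : Int) - prev.getD 0 - 1 < step_between_sp_symbols then true else bad
    else bad
  !bad && decide (count = number_of_sp_symbols)

-- ===== PRECONDITION & SPEC =====
-- Pre_ excludes exactly the inputs where A raises IndexError (no occurrence of the
-- special symbol while a nonzero count is demanded); B raises TypeError there too.
def Pre_check_special_symbols (reel : List String) (special_symbol : String) (step_between_sp_symbols : Int) (number_of_sp_symbols : Int) : Prop :=
  number_of_sp_symbols = 0 ∨ special_symbol ∈ reel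
instance (reel : List String) (special_symbol : String) (step_between_sp_symbols : Int) (number_of_sp_symbols : Int) : Decidable (Pre_check_special_symbols reel special_symbol step_between_sp_symbols number_of_sp_symbols) := by unfold Pre_check_special_symbols; infer_instance

def pvWitness_check_special_symbols : List String × String × Int × Int := (["X", "a", "X"], "X", 1, 2)

def Spec_check_special_symbols (reel : List String) (special_symbol : String) (step_between_sp_symbols : Int) (number_of_sp_symbols : Int) (out : Bool) : Prop := out = check_special_symbols_alt reel special_symbol step_between_sp_symbols number_of_sp_symbols
instance (reel : List String) (special_symbol : String) (step_between_sp_symbols : Int) (number_of_sp_symbols : Int) (out : Bool) : Decidable (Spec_check_special_symbols reel special_symbol step_between_sp_symbols number_of_sp_symbols out) := by unfold Spec_check_special_symbols; infer_instance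

-- ===== CLAIM (what is proved, stated in full; the proofs are below) =====
def Claim_equal_check_special_symbols : Prop := ∀ (reel : List String) (special_symbol : String) (step_between_sp_symbols : Int) (number_of_sp_symbols : Int), Dom_check_special_symbols reel special_symbol step_between_sp_symbols number_of_sp_symbols → Pre_check_special_symbols reel special_symbol step_between_sp_symbols number_of_sp_symbols → Spec_check_special_symbols reel special_symbol step_between_sp_symbols number_of_sp_symbols (check_special_symbols reel special_symbol step_between_sp_symbols number_of_sp_symbols)

-- ===== LEMMAS AND PROOFS =====

-- match positions of `s` in `reel`, indexed from `k`
def posIdx (reel : List String) (s : String) (k : Int) : List Int :=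
  match reel with
  | [] => []
  | x :: xs => if x = s then k :: posIdx xs s (k + 1) else posIdx xs s (k + 1)

-- adjacent differences
def diffs (ps : List Int) : List Int :=
  match ps with
  | a :: b :: t => (b - a) :: diffs (b :: t)
  | _ => []

-- A's first loop builds exactly the match positions
theorem posA_fold (reel : List String) (s : String) :
    ∀ (n k : Nat) (acc : List Int), reel.length - k = n →
    (PySem.List.pyRange (k : Int) (reel.length : Int) 1).foldl
      (fun acc i => if PySem.List.pyGetD reel i "" = s then acc ++ [i] else acc) acc
    = acc ++ posIdx (reel.drop k) s k := by
  intro n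
  induction n with
  | zero =>
    intro k acc h
    have hk : reel.length ≤ k := by omega
    rw [PySem.List.pyRange_one_eq_nil (by exact_mod_cast hk), List.drop_eq_nil_of_le hk]
    simp [posIdx]
  | succ m ih =>
    intro k acc h
    have hk : k < reel.length := by omega
    rw [PySem.List.pyRange_one_cons (by exact_mod_cast hk)]
    simp only [List.foldl_cons]
    have hget : PySem.List.pyGetD reel (k : Int) "" = reel[k] := by
      simp [PySem.List.pyGetD_natCast, List.getD_eq_getElem?_getD, hk]
    rw [hget]
    have hdrop : reel.drop k = reel[k] :: reel.drop (k + 1) := List.drop_eq_getElem_cons hk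
    have hcast : ((k : Int) + 1) = ((k + 1 : Nat) : Int) := by push_cast; ring
    rw [hcast]
    rw [ih (k + 1) _ (by omega)]
    rw [hdrop]
    by_cases hxs : reel[k] = s <;> simp [posIdx, hxs]

-- A's second loop builds exactly the adjacent differences
theorem diffs_short (ps : List Int) (h : ps.length ≤ 1) : diffs ps = [] := by
  match ps, h with
  | [], _ => rfl
  | [a], _ => rfl

theorem diffsA_fold (ps : List Int) :
    ∀ (n k : Nat) (acc : List Int), ps.length - (k + 1) = n →
    (PySem.List.pyRange ((k : Int) + 1) (ps.length : Int) 1).foldl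
      (fun acc i => acc ++ [PySem.List.pyGetD ps i 0 - PySem.List.pyGetD ps (i - 1) 0]) acc
    = acc ++ diffs (ps.drop k) := by
  intro n
  induction n with
  | zero =>
    intro k acc h
    have hk : ps.length ≤ k + 1 := by omega
    rw [PySem.List.pyRange_one_eq_nil (by exact_mod_cast hk)]
    rw [diffs_short _ (by simp; omega)]
    simp
  | succ m ih =>
    intro k acc h
    have hk : k + 1 < ps.length := by omega
    rw [PySem.List.pyRange_one_cons (by exact_mod_cast hk)]
    simp only [List.foldl_cons]
    have h1 : PySem.List.pyGetD ps ((k : Int) + 1) 0 = ps[k + 1] := by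
      have e1 : ((k : Int) + 1) = ((k + 1 : Nat) : Int) := by push_cast; ring
      rw [e1, PySem.List.pyGetD_natCast]
      simp [List.getD_eq_getElem?_getD, List.getElem?_eq_getElem hk]
    have h2 : PySem.List.pyGetD ps ((k : Int) + 1 - 1) 0 = ps[k] := by
      have e2 : ((k : Int) + 1 - 1) = ((k : Nat) : Int) := by push_cast; ring
      rw [e2, PySem.List.pyGetD_natCast]
      simp [List.getD_eq_getElem?_getD, List.getElem?_eq_getElem (show k < ps.length by omega)]
    rw [h1, h2]
    have hcast : ((k : Int) + 1 + 1) = ((k + 1 : Nat) : Int) + 1 := by push_cast; ring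
    rw [hcast, ih (k + 1) _ (by omega)]
    have hd1 : ps.drop k = ps[k] :: ps.drop (k + 1) := List.drop_eq_getElem_cons (by omega)
    have hd2 : ps.drop (k + 1) = ps[k + 1] :: ps.drop (k + 2) := List.drop_eq_getElem_cons hk
    rw [hd1, hd2, diffs, ← hd2]
    simp

-- the error-flag loop is an "any"
theorem orFold (step : Int) (l : List Int) :
    ∀ b : Bool, l.foldl (fun e x => if x < step then true else e) b
      = (b || l.any (fun x => decide (x < step))) := by
  induction l with
  | nil => simp
  | cons x t ih =>
    intro b
    simp only [List.foldl_cons, List.any_cons, ih]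
    by_cases hx : x < step <;> cases b <;> simp [hx]

-- B's pass over the reel is a fold of pvG over the match positions
def pvG (step : Int) (st : Int × Option Int × Option Int × Bool) (i : Int) :
    Int × Option Int × Option Int × Bool :=
  match st with
  | (c, _f, none, b) => (c + 1, some i, some i, b)
  | (c, f, some pv, b) => (c + 1, f, some i, if i - pv < step then true else b)

theorem foldB_eq (s : String) (step : Int) :
    ∀ (reel : List String) (k : Int) (st : Int × Option Int × Option Int × Bool),
    (PySem.List.enumerate reel k).foldl (pvStepB s step) st
      = (posIdx reel s k).foldl (pvG step) st := by
  intro reel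
  induction reel with
  | nil => intro k st; simp [PySem.List.enumerate_nil, posIdx]
  | cons x xs ih =>
    intro k st
    rw [PySem.List.enumerate_cons]
    simp only [List.foldl_cons, posIdx]
    by_cases hx : x = s
    · obtain ⟨c, f, p, b⟩ := st
      cases p <;> simp [pvStepB, pvG, hx, ih]
    · simp [pvStepB, hx, ih]

theorem runG_some (step : Int) (ps : List Int) :
    ∀ (c : Int) (f p : Int) (b : Bool),
    ps.foldl (pvG step) (c, some f, some p, b)
      = (c + ps.length, some f, some (ps.getLastD p),
         b || (diffs (p :: ps)).any (fun x => decide (x < step))) := by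
  induction ps with
  | nil => intro c f p b; simp [diffs]
  | cons q t ih =>
    intro c f p b
    simp only [List.foldl_cons, pvG, ih, diffs]
    refine Prod.ext ?_ (Prod.ext rfl (Prod.ext ?_ ?_))
    · simp only [List.length_cons]; push_cast; ring
    · rw [List.getLastD_cons]
    · simp only [List.any_cons]
      by_cases hq : q - p < step <;> cases b <;> simp [hq]

theorem runG_cons (step : Int) (q : Int) (t : List Int) :
    (q :: t).foldl (pvG step) (0, none, none, false)
      = (1 + (t.length : Int), some q, some (t.getLastD q),
         (diffs (q :: t)).any (fun x => decide (x < step))) := by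
  simp only [List.foldl_cons, pvG, runG_some]
  simp

theorem posIdx_ne_nil (reel : List String) (s : String) :
    ∀ k : Int, s ∈ reel ↔ posIdx reel s k ≠ [] := by
  induction reel with
  | nil => intro k; simp [posIdx]
  | cons x xs ih =>
    intro k
    by_cases hx : x = s <;> simp [posIdx, hx, List.mem_cons, ih (k + 1)]
    exact fun h => (hx h.symm).elim

theorem pyGetD_last (ps : List Int) (h : ps ≠ []) :
    PySem.List.pyGetD ps (-1) 0 = ps.getLast h := by
  exact PySem.List.pyGetD_neg_one ps 0 h

theorem getLast_cons_eq_getLastD (q : Int) (t : List Int) :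
    (q :: t).getLast (List.cons_ne_nil q t) = t.getLastD q := by
  rw [List.getLast_eq_getLastD]

set_option maxRecDepth 8000 in
theorem main_equiv (reel : List String) (s : String) (step num : Int)
    (hpre : num = 0 ∨ s ∈ reel) :
    check_special_symbols reel s step num = check_special_symbols_alt reel s step num := by
  simp only [check_special_symbols, check_special_symbols_alt]
  have hpos := posA_fold reel s (reel.length) 0 [] (by omega)
  simp only [Nat.cast_zero, List.drop_zero, List.nil_append] at hpos
  rw [hpos]
  set ps := posIdx reel s 0 with hps
  have hdiff := diffsA_fold ps (ps.length - 1) 0 [] (by omega)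
  simp only [Nat.cast_zero, List.drop_zero, List.nil_append, zero_add] at hdiff
  rw [hdiff]
  rw [foldB_eq]
  rw [← hps]
  by_cases hnum : num = 0
  · -- no wrap gap on either side
    simp only [hnum, ne_eq, not_true_eq_false, if_false]
    cases hpsc : ps with
    | nil => simp [diffs]
    | cons q t =>
      rw [runG_cons, orFold]
      simp only [Bool.false_or]
      have hlen : (((q :: t).length : Int)) = 1 + (t.length : Int) := by rw [List.length_cons]; push_cast; ring
      rw [hlen]
      have hlz : ¬ (1 + (t.length : Int) = 0) := by omega
      by_cases hb : (diffs (q :: t)).any (fun x => decide (x < step)) <;> simp [hb, hlz]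
  · have hmem : s ∈ reel := hpre.resolve_left hnum
    have hne : ps ≠ [] := (posIdx_ne_nil reel s 0).mp hmem
    cases hpsc : ps with
    | nil => exact absurd hpsc (hpsc ▸ hne)
    | cons q t =>
      rw [runG_cons]
      simp only [hnum, ne_eq, not_false_eq_true, if_true]
      have hhead : PySem.List.pyGetD (q :: t) 0 0 = q := PySem.List.pyGetD_zero_cons q t 0
      have hlast : PySem.List.pyGetD (q :: t) (-1) 0 = t.getLastD q := by
        rw [pyGetD_last (q :: t) (List.cons_ne_nil q t), getLast_cons_eq_getLastD]
      rw [hhead, hlast, orFold]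
      simp only [List.any_append, List.any_cons, List.any_nil, Bool.false_or, Bool.or_false,
        Option.getD_some]
      have hlen : (((q :: t).length : Int)) = 1 + (t.length : Int) := by rw [List.length_cons]; push_cast; ring
      rw [hlen]
      by_cases hg : q + (reel.length : Int) - t.getLastD q - 1 < step <;>
        by_cases hb : (diffs (q :: t)).any (fun x => decide (x < step)) <;>
          by_cases hx : (1 + (t.length : Int) = num) <;>
            simp [hb, hx]


-- ===== VERDICT =====
theorem check_special_symbols_spec : Claim_equal_check_special_symbols := by
  intro reel s step num _ hpre
  unfold Spec_check_special_symbols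
  exact main_equiv reel s step num hpre
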